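-- pv_equiv track=rewrite | github.com/rikeda71/Shinra | scripts/make_annotated_corpus.py | annotation_to_line
-- ===== SOURCE A (Python) =====
-- from typing import (
--     List, Dict, Tuple, DefaultDict, Any
-- )
--
-- def slide_annotate_idx(plus_lens: List[Tuple[int, int]], i: int) -> int:
--     """
--     slide annotation index. support `annotation_to_line` method
--     :param plus_lens: [(index, label_len), (index, label_len)]
--     :type plus_lens: List[Tuple[int, int]]
--     :param i: [annotation index]
--     :type i: int
--     :return: [slide index value]
--     :rtype: int
--     """
--
--     if len(plus_lens) == 0:
--         return 0
--     return sum([len_tuple[1] for len_tuple in plus_lens if len_tuple[0] < i])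
--
-- def annotation_to_line(line: str, start_idx: List[int], end_idx: List[int],
--                        labels: List[str]) -> str:
--     """
--     annotate labels to a sentence
--     :param line: [a sentence]
--     :type line: str
--     :param start_idx: [head of named entity indexes]
--     :type start_idx: List[int]
--     :param end_idx: [tail of named entity indexes]
--     :type end_idx: List[int]
--     :param labels: [named entity classes]
--     :type labels: List[str]
--     :return: [a sentence annotated labels]
--     :rtype: [str]
--     """
--
--     plus_lens = []
--     for s, e, a in zip(start_idx, end_idx, labels):
--         line = line[:e + slide_annotate_idx(plus_lens, e)] + \
--             '[/l-{}]'.format(a) + line[e + slide_annotate_idx(plus_lens, e):]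
--         line = line[:s + slide_annotate_idx(plus_lens, s)] + \
--             '[l-{}]'.format(a) + line[s + slide_annotate_idx(plus_lens, s):]
--         plus_lens.append((s, 4 + len(a)))
--         plus_lens.append((e, 5 + len(a)))
--     return line
-- ===== SOURCE B (Python) =====
-- def annotation_to_line(line, start_idx, end_idx, labels):
--     # pass 1: arithmetic only — the offset at which each tag lands in the
--     # text as it stands at the moment of its insertion
--     offs = []   # (annotation index, inserted tag length) seen so far
--     ops = []    # (offset, tag) in insertion order
--     for s, e, a in zip(start_idx, end_idx, labels):
--         close_tag = '[/l-{}]'.format(a)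
--         open_tag = '[l-{}]'.format(a)
--         for idx, tag in ((e, close_tag), (s, open_tag)):
--             ops.append((idx + sum(l for c, l in offs if c < idx), tag))
--         offs.append((s, len(open_tag)))
--         offs.append((e, len(close_tag)))
--     # pass 2: splice the tags into a mutable character list, join once
--     chars = list(line)
--     for pos, tag in ops:
--         chars[pos:pos] = tag
--     return ''.join(chars)
-- ===== Notes on version B (the rewrite author's own statement) =====
-- stated objective: alternative
-- what changed: A rebuilds the whole string by slicing at every tag insertion, recomputing the slide offset from plus_lens via a helper for each slice; B separates the work into an arithmetic pass that records each tag's insertion offset and a splicing pass that edits one mutable character list by slice assignment, joined once at the end.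
import Mathlib
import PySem

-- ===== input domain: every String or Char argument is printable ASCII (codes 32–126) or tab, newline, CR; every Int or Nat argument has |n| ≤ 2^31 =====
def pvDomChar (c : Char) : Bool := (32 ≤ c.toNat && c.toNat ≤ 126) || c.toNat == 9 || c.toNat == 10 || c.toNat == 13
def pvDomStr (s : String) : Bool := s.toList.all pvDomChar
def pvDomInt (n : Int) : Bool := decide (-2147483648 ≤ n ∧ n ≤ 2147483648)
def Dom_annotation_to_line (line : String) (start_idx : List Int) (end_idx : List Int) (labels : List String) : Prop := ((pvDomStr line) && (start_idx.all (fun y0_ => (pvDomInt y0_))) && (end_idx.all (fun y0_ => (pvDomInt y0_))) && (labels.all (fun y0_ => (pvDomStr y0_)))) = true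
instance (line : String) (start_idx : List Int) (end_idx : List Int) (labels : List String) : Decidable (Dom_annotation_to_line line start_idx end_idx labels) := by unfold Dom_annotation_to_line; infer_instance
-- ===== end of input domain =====

-- B separates the work into an arithmetic pass computing every tag's insertion offset and a
-- splicing pass over one mutable character list joined once, instead of A's rebuilding the whole
-- string by slicing at each insertion (objective: alternative).


-- ===== PORT A =====
-- sum([len_tuple[1] for len_tuple in plus_lens if len_tuple[0] < i]) with the len == 0 guard
def slide_annotate_idx (plus_lens : List (Int × Int)) (i : Int) : Int :=
  if plus_lens.length = 0 then 0
  else ((plus_lens.filter (fun t => decide (t.1 < i))).map (fun t => t.2)).sum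

-- one iteration of A's for-loop: two slice-insertions, then two appends to plus_lens
def annotateStepA (st : List Char × List (Int × Int)) (t : Int × Int × String) :
    List Char × List (Int × Int) :=
  let line := st.1
  let plus_lens := st.2
  let s := t.1
  let e := t.2.1
  let a := t.2.2.toList
  let line :=
    PySem.List.slice line none (some (e + slide_annotate_idx plus_lens e)) ++
      (['[', '/', 'l', '-'] ++ a ++ [']']) ++
      PySem.List.slice line (some (e + slide_annotate_idx plus_lens e)) none
  let line :=
    PySem.List.slice line none (some (s + slide_annotate_idx plus_lens s)) ++
      (['[', 'l', '-'] ++ a ++ [']']) ++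
      PySem.List.slice line (some (s + slide_annotate_idx plus_lens s)) none
  (line, plus_lens ++ [(s, 4 + (a.length : Int))] ++ [(e, 5 + (a.length : Int))])

def annotation_to_line (line : String) (start_idx : List Int) (end_idx : List Int) (labels : List String) : String :=
  String.ofList
    (((start_idx.zip (end_idx.zip labels)).foldl annotateStepA (line.toList, [])).1)

-- ===== PORT B =====
-- chars[pos:pos] = tag  (Python list slice assignment on the mutable character list)
def spliceAssign (chars : List Char) (pos : Int) (tag : List Char) : List Char :=
  PySem.List.slice chars none (some pos) ++ tag ++ PySem.List.slice chars (some pos) none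

-- one iteration of Source B's first loop: state (offs, ops)
def posStepB (st : List (Int × Int) × List (Int × List Char)) (t : Int × Int × String) :
    List (Int × Int) × List (Int × List Char) :=
  let offs := st.1
  let a := t.2.2.toList
  let close_tag := ['[', '/', 'l', '-'] ++ a ++ [']']
  let open_tag := ['[', 'l', '-'] ++ a ++ [']']
  -- for idx, tag in ((e, close_tag), (s, open_tag)): ops.append(…)
  let ops :=
    [(t.2.1, close_tag), (t.1, open_tag)].foldl
      (fun (ops : List (Int × List Char)) it =>
        ops ++ [(it.1 + ((offs.filter (fun c => decide (c.1 < it.1))).map (fun c => c.2)).sum, it.2)])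
      st.2
  (offs ++ [(t.1, (open_tag.length : Int))] ++ [(t.2.1, (close_tag.length : Int))], ops)

def annotation_to_line_alt (line : String) (start_idx : List Int) (end_idx : List Int) (labels : List String) : String :=
  let st := (start_idx.zip (end_idx.zip labels)).foldl posStepB ([], [])
  let chars := st.2.foldl (fun chars op => spliceAssign chars op.1 op.2) line.toList
  String.ofList chars

-- ===== PRECONDITION & SPEC =====
def Spec_annotation_to_line (line : String) (start_idx : List Int) (end_idx : List Int) (labels : List String) (out : String) : Prop := out = annotation_to_line_alt line start_idx end_idx labels
instance (line : String) (start_idx : List Int) (end_idx : List Int) (labels : List String) (out : String) : Decidable (Spec_annotation_to_line line start_idx end_idx labels out) := by unfold Spec_annotation_to_line; infer_instance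

-- ===== CLAIM (what is proved, stated in full; the proofs are below) =====
def Claim_equal_annotation_to_line : Prop := ∀ (line : String) (start_idx : List Int) (end_idx : List Int) (labels : List String), Dom_annotation_to_line line start_idx end_idx labels → Spec_annotation_to_line line start_idx end_idx labels (annotation_to_line line start_idx end_idx labels)

-- ===== LEMMAS AND PROOFS =====
def pvCT (a : String) : List Char := ['[', '/', 'l', '-'] ++ a.toList ++ [']']
def pvOT (a : String) : List Char := ['[', 'l', '-'] ++ a.toList ++ [']']
def pvApply (ops : List (Int × List Char)) (chars : List Char) : List Char :=
  ops.foldl (fun c op => spliceAssign c op.1 op.2) chars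

theorem posStepB_eq (pl : List (Int × Int)) (ops : List (Int × List Char))
    (s e : Int) (a : String) :
    posStepB (pl, ops) (s, e, a)
      = (pl ++ [(s, ((pvOT a).length : Int))] ++ [(e, ((pvCT a).length : Int))],
         ops ++ [(e + slide_annotate_idx pl e, pvCT a)]
             ++ [(s + slide_annotate_idx pl s, pvOT a)]) := by
  cases pl <;>
    simp only [posStepB, pvCT, pvOT, List.foldl_cons, List.foldl_nil, slide_annotate_idx] <;>
    simp [List.append_assoc]

theorem stepA_eq (S : List Char) (pl : List (Int × Int)) (s e : Int) (a : String) :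
    annotateStepA (S, pl) (s, e, a)
      = (spliceAssign (spliceAssign S (e + slide_annotate_idx pl e) (pvCT a))
           (s + slide_annotate_idx pl s) (pvOT a),
         pl ++ [(s, ((pvOT a).length : Int))] ++ [(e, ((pvCT a).length : Int))]) := by
  simp only [annotateStepA, spliceAssign, pvCT, pvOT, Prod.mk.injEq]
  refine ⟨trivial, ?_⟩
  simp
  omega

theorem pvMain (T : List (Int × Int × String)) :
    ∀ (pl : List (Int × Int)) (ops0 : List (Int × List Char)) (C : List Char),
    (T.foldl annotateStepA (pvApply ops0 C, pl)).1
      = pvApply ((T.foldl posStepB (pl, ops0)).2) C := by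
  induction T with
  | nil => intro pl ops0 C; simp
  | cons t T ih =>
    intro pl ops0 C
    obtain ⟨s, e, a⟩ := t
    have happ : ∀ (o : Int × List Char) (ops : List (Int × List Char)),
        pvApply (ops ++ [o]) C = spliceAssign (pvApply ops C) o.1 o.2 := by
      intro o ops; simp [pvApply]
    simp only [List.foldl_cons, stepA_eq, posStepB_eq]
    rw [show spliceAssign (spliceAssign (pvApply ops0 C) (e + slide_annotate_idx pl e) (pvCT a))
          (s + slide_annotate_idx pl s) (pvOT a)
        = pvApply (ops0 ++ [(e + slide_annotate_idx pl e, pvCT a)]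
            ++ [(s + slide_annotate_idx pl s, pvOT a)]) C by
      rw [happ, happ]]
    exact ih _ _ C

-- ===== VERDICT (by name: the statement is the Claim_ definition above) =====
theorem annotation_to_line_spec : Claim_equal_annotation_to_line := by
  intro line start_idx end_idx labels _
  unfold Spec_annotation_to_line annotation_to_line annotation_to_line_alt
  congr 1
  have h := pvMain (start_idx.zip (end_idx.zip labels)) [] [] line.toList
  simpa [pvApply] using h
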